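-- pv_equiv track=rewrite | github.com/FarhanTahmid/CSE-498R | Models/English/english_nlp.py | get_contextual_keywords
-- ===== SOURCE A (Python) =====
-- from collections import Counter
--
-- def get_contextual_keywords(texts, hate_terms, assigned_topics, window=5):
--     contextual_keywords = {}
--     for topic in set(assigned_topics):
--         contextual_keywords[topic] = Counter()
--
--     for text, topic in zip(texts, assigned_topics):
--         words = text
--         for i, word in enumerate(words):
--             if word in hate_terms[topic]:
--                 # Get surrounding words
--                 start = max(0, i - window)
--                 end = min(len(words), i + window + 1)
--                 surrounding_words = words[start:i] + words[i + 1:end]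
--
--                 # Exclude hates speech terms from surrounding_words
--                 surrounding_words = [w for w in surrounding_words if w not in hate_terms[topic]]
--
--                 contextual_keywords[topic].update(surrounding_words)
--
--     return contextual_keywords
-- ===== SOURCE B (Python) =====
-- from collections import Counter
--
-- def get_contextual_keywords(texts, hate_terms, assigned_topics, window=5):
--     contextual_keywords = {topic: Counter() for topic in set(assigned_topics)}
--
--     for words, topic in zip(texts, assigned_topics):
--         hate_set = set(hate_terms[topic])
--         is_hate = [w in hate_set for w in words]
--         n = len(words)
--         ctr = contextual_keywords[topic]
--         # sliding count of hate-term positions inside the inclusive window [j-window, j+window]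
--         cnt = sum(is_hate[0:min(n, window + 1)])
--         for j in range(n):
--             if j > 0:
--                 if j + window < n and is_hate[j + window]:
--                     cnt += 1
--                 if j - window - 1 >= 0 and is_hate[j - window - 1]:
--                     cnt -= 1
--             if not is_hate[j] and cnt:
--                 ctr[words[j]] += cnt
--
--     return contextual_keywords
-- ===== Notes on version B (the rewrite author's own statement) =====
-- stated objective: alternative
-- what changed: B inverts the computation to the consumer side: one pass per text over word positions maintaining a sliding count of hate-term positions inside the inclusive +/-window, adding that count to the topic's Counter at each non-hate word, instead of A's re-slicing and re-filtering of the neighbourhood of every hate-term occurrence.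
-- outside the precondition, e.g. on get_contextual_keywords([[]], {}, [0], 5): A returns {0: {}}, B raises KeyError
import Mathlib
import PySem

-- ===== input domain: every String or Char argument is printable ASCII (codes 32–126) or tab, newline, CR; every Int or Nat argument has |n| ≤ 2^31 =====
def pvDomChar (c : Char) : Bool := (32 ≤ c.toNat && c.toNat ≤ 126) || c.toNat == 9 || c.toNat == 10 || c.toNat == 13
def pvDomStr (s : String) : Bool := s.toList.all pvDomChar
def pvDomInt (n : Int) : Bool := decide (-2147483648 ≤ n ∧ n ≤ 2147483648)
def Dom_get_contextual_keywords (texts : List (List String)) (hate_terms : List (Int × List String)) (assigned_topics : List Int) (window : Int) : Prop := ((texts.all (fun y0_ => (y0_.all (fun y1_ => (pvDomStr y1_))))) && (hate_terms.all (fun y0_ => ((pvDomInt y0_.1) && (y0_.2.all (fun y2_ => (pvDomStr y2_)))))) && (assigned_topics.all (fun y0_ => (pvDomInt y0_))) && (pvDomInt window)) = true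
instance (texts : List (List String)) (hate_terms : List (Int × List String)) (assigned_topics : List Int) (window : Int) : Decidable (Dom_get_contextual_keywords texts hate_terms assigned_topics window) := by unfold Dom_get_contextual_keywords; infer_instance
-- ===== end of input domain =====

-- B replaces A's producer-side scan (re-slicing and re-filtering the neighbourhood of every hate-term
-- occurrence) by one consumer-side pass per text with a sliding count of hate-term positions in the
-- inclusive ±window, added to the topic's Counter at each non-hate word.

-- ===== PORT A =====
def get_contextual_keywords (texts : List (List String)) (hate_terms : List (Int × List String)) (assigned_topics : List Int) (window : Int) : List (Int × List (String × Int)) :=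
  let ht : PySem.Dict Int (List String) := ⟨hate_terms⟩
  let ck0 : PySem.Dict Int (PySem.Dict String Int) :=
    (PySem.Set.ofList assigned_topics).foldl (fun d topic => d.insert topic PySem.Dict.empty) ⟨[]⟩
  let ck := (texts.zip assigned_topics).foldl (fun ck p =>
    let words := p.1
    let topic := p.2
    (PySem.List.enumerate words).foldl (fun ck iw =>
      let i := iw.1
      let word := iw.2
      if (ht.getD topic []).contains word = true then
        let start := max 0 (i - window)
        let stop := min (PySem.List.len words) (i + window + 1)
        let surrounding := PySem.List.slice words (some start) (some i) ++
                           PySem.List.slice words (some (i + 1)) (some stop)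
        let surrounding := surrounding.filter (fun x => !((ht.getD topic []).contains x))
        ck.insert topic (surrounding.foldl (fun c x => c.modify x 0 (· + 1)) (ck.getD topic PySem.Dict.empty))
      else ck) ck) ck0
  ck.items.map (fun p => (p.1, p.2.items))

-- ===== PORT B =====
def get_contextual_keywords_alt (texts : List (List String)) (hate_terms : List (Int × List String)) (assigned_topics : List Int) (window : Int) : List (Int × List (String × Int)) :=
  let ht : PySem.Dict Int (List String) := ⟨hate_terms⟩
  let ck0 : PySem.Dict Int (PySem.Dict String Int) :=
    (PySem.Set.ofList assigned_topics).foldl (fun d topic => d.insert topic PySem.Dict.empty) ⟨[]⟩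
  let ck := (texts.zip assigned_topics).foldl (fun ck p =>
    let words := p.1
    let topic := p.2
    let hate_set : PySem.Set String := PySem.Set.ofList (ht.getD topic [])
    let is_hate : List Bool := words.map (fun x => PySem.Set.contains hate_set x)
    let n : Int := PySem.List.len words
    let cnt0 : Int := ((PySem.List.slice is_hate (some 0) (some (min n (window + 1)))).map
      (fun b => if b then (1 : Int) else 0)).sum
    let res := (PySem.List.pyRange 0 n 1).foldl (fun (s : Int × PySem.Dict String Int) j =>
      let cnt :=
        if 0 < j then
          let cnt := if j + window < n ∧ PySem.List.pyGetD is_hate (j + window) false = true then s.1 + 1 else s.1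
          if 0 ≤ j - window - 1 ∧ PySem.List.pyGetD is_hate (j - window - 1) false = true then cnt - 1 else cnt
        else s.1
      let ctr :=
        if PySem.List.pyGetD is_hate j false = false ∧ cnt ≠ 0 then
          s.2.modify (PySem.List.pyGetD words j "") 0 (· + cnt)
        else s.2
      (cnt, ctr)) (cnt0, ck.getD topic PySem.Dict.empty)
    ck.insert topic res.2) ck0
  ck.items.map (fun p => (p.1, p.2.items))

-- ===== PRECONDITION & SPEC =====
-- Pre_ excludes negative windows (outside the task's natural domain: A's value there is an accident of
-- Python's negative-slice wraparound, and B's sliding pass raises IndexError) and topic assignments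
-- missing from hate_terms among the zipped pairs (A raises KeyError there whenever the zipped text is
-- nonempty, and B always raises KeyError there).
def Pre_get_contextual_keywords (texts : List (List String)) (hate_terms : List (Int × List String)) (assigned_topics : List Int) (window : Int) : Prop :=
  0 ≤ window ∧ ∀ p ∈ texts.zip assigned_topics, (PySem.Dict.mk hate_terms).contains p.2 = true
instance (texts : List (List String)) (hate_terms : List (Int × List String)) (assigned_topics : List Int) (window : Int) : Decidable (Pre_get_contextual_keywords texts hate_terms assigned_topics window) := by unfold Pre_get_contextual_keywords; infer_instance

def pvWitness_get_contextual_keywords : List (List String) × (List (Int × List String)) × List Int × Int :=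
  ([["a", "h", "b", "a"]], [(0, ["h"])], [0], 1)

def Spec_get_contextual_keywords (texts : List (List String)) (hate_terms : List (Int × List String)) (assigned_topics : List Int) (window : Int) (out : List (Int × List (String × Int))) : Prop := out = get_contextual_keywords_alt texts hate_terms assigned_topics window
instance (texts : List (List String)) (hate_terms : List (Int × List String)) (assigned_topics : List Int) (window : Int) (out : List (Int × List (String × Int))) : Decidable (Spec_get_contextual_keywords texts hate_terms assigned_topics window out) := by unfold Spec_get_contextual_keywords; infer_instance

-- ===== CLAIM (what is proved, stated in full; the proofs are below) =====
def Claim_equal_get_contextual_keywords : Prop := ∀ (texts : List (List String)) (hate_terms : List (Int × List String)) (assigned_topics : List Int) (window : Int), Dom_get_contextual_keywords texts hate_terms assigned_topics window → Pre_get_contextual_keywords texts hate_terms assigned_topics window → Spec_get_contextual_keywords texts hate_terms assigned_topics window (get_contextual_keywords texts hate_terms assigned_topics window)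

-- ===== LEMMAS AND PROOFS =====

def pvAdd (d : PySem.Dict String Int) (k : String) (a : Int) : PySem.Dict String Int :=
  d.modify k 0 (· + a)

theorem pv_contains_map_insert {κ ν : Type} [BEq κ] [LawfulBEq κ] (l : List (κ × ν)) (k k' : κ) (x : ν)
    (hne : k ≠ k') :
    (l.map (fun p => if p.1 == k' then (k', x) else p)).any (fun p => p.1 == k)
      = l.any (fun p => p.1 == k) := by
  induction l with
  | nil => rfl
  | cons p t ih =>
    simp only [List.map_cons, List.any_cons, ih]
    by_cases h : p.1 == k'
    · have hp : p.1 = k' := beq_iff_eq.mp h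
      simp only [h, if_true]
      have h1 : (k' == k) = false := beq_eq_false_iff_ne.mpr (Ne.symm hne)
      have h2 : (p.1 == k) = false := by rw [hp]; exact h1
      simp [h1, h2]
    · simp only [h, Bool.false_eq_true, if_false]

theorem pv_insert_comm_of_contains {κ ν : Type} [BEq κ] [LawfulBEq κ] (d : PySem.Dict κ ν)
    (k k' : κ) (y x : ν) (hne : k ≠ k') (hk : d.contains k = true) :
    (d.insert k' x).insert k y = (d.insert k y).insert k' x := by
  have hkk' : (k == k') = false := beq_eq_false_iff_ne.mpr hne
  have hk'k : (k' == k) = false := beq_eq_false_iff_ne.mpr (Ne.symm hne)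
  by_cases hk' : d.contains k' = true
  · simp only [PySem.Dict.insert, PySem.Dict.contains] at hk hk' ⊢
    simp only [hk, hk', if_true]
    rw [pv_contains_map_insert d.items k k' x hne, pv_contains_map_insert d.items k' k y (Ne.symm hne)]
    simp only [hk, hk', if_true, List.map_map]
    congr 1
    apply List.map_congr_left
    intro p _
    simp only [Function.comp]
    by_cases h1 : p.1 == k'
    · have hp : p.1 = k' := beq_iff_eq.mp h1
      have h2 : (p.1 == k) = false := by rw [hp]; exact hk'k
      simp [h1, h2, hk'k]
    · by_cases h2 : p.1 == k
      · simp [h1, h2, hkk']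
      · simp [h1, h2]
  · have hk'f : d.contains k' = false := Bool.eq_false_iff.mpr hk'
    clear hk'
    simp only [PySem.Dict.insert, PySem.Dict.contains] at hk hk'f ⊢
    simp only [hk, hk'f, if_true, Bool.false_eq_true, if_false]
    have h1 : ((d.items ++ [(k', x)]).any fun p => p.1 == k) = true := by
      rw [List.any_append, hk]; rfl
    rw [h1]
    rw [pv_contains_map_insert d.items k' k y (Ne.symm hne)]
    simp only [hk'f, if_true, Bool.false_eq_true, if_false, List.map_append, List.map_cons,
      List.map_nil]
    have h2 : (if (k' == k) = true then (k, y) else (k', x)) = (k', x) := by rw [hk'k]; rfl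
    rw [h2]

theorem pvAdd_add_same (d : PySem.Dict String Int) (k : String) (a b : Int) :
    pvAdd (pvAdd d k a) k b = pvAdd d k (a + b) := by
  simp only [pvAdd, PySem.Dict.modify]
  rw [PySem.Dict.getD_insert_self, PySem.Dict.insert_insert_self]
  ring_nf

theorem pvAdd_contains (d : PySem.Dict String Int) (k k' : String) (b : Int)
    (h : d.contains k = true) : (pvAdd d k' b).contains k = true := by
  simp only [pvAdd, PySem.Dict.modify]
  rw [PySem.Dict.contains_insert]
  simp [h]

theorem pvAdd_comm (d : PySem.Dict String Int) (k k' : String) (a b : Int)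
    (h : d.contains k = true ∨ k = k') :
    pvAdd (pvAdd d k' b) k a = pvAdd (pvAdd d k a) k' b := by
  by_cases he : k = k'
  · subst he
    rw [pvAdd_add_same, pvAdd_add_same, Int.add_comm]
  · have hc : d.contains k = true := h.resolve_right he
    simp only [pvAdd, PySem.Dict.modify]
    rw [PySem.Dict.getD_insert_of_ne d _ _ (Ne.symm he), PySem.Dict.getD_insert_of_ne d _ _ he]
    exact pv_insert_comm_of_contains d k k' _ _ he hc

theorem pvAdd_foldl_comm {β : Type} (l : List β) (key : β → String) (val : β → Int)
    (d : PySem.Dict String Int) (k : String) (a : Int) (h : d.contains k = true) :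
    l.foldl (fun c x => pvAdd c (key x) (val x)) (pvAdd d k a)
      = pvAdd (l.foldl (fun c x => pvAdd c (key x) (val x)) d) k a := by
  induction l generalizing d with
  | nil => rfl
  | cons x t ih =>
    simp only [List.foldl_cons]
    rw [← pvAdd_comm d k (key x) a (val x) (Or.inl h)]
    exact ih _ (pvAdd_contains _ _ _ _ h)

theorem pvMerge (js : List Int) (key : Int → String) (v : Int → Int) (d : PySem.Dict String Int) :
    js.foldl (fun c j => pvAdd c (key j) 1) (js.foldl (fun c j => pvAdd c (key j) (v j)) d)
      = js.foldl (fun c j => pvAdd c (key j) (v j + 1)) d := by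
  induction js generalizing d with
  | nil => rfl
  | cons j t ih =>
    simp only [List.foldl_cons]
    have hc : (pvAdd d (key j) (v j)).contains (key j) = true := by
      simp only [pvAdd, PySem.Dict.modify]
      exact PySem.Dict.contains_insert_self _ _ _
    rw [← pvAdd_foldl_comm t key v (pvAdd d (key j) (v j)) (key j) 1 hc]
    rw [pvAdd_add_same]
    exact ih _

theorem pv_map_find_id {κ ν : Type} [BEq κ] [LawfulBEq κ] (l : List (κ × ν)) (k : κ) (v : ν)
    (hnd : (l.map Prod.fst).Nodup) (h : l.find? (fun p => p.1 == k) = some (k, v)) :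
    l.map (fun p => if p.1 == k then (k, v) else p) = l := by
  induction l with
  | nil => simp at h
  | cons p t ih =>
    simp only [List.map_cons, List.nodup_cons] at hnd
    by_cases hp : p.1 == k
    · have hp1 : p.1 = k := beq_iff_eq.mp hp
      simp only [List.find?_cons, hp, if_true] at h
      have hpv : p = (k, v) := by injection h
      simp only [List.map_cons, hp, if_true]
      rw [hpv]
      congr 1
      have hne : ∀ q ∈ t, ((q.1 == k) = false) := by
        intro q hq
        apply beq_eq_false_iff_ne.mpr
        intro hqk
        exact hnd.1 (by rw [hp1, ← hqk]; exact List.mem_map_of_mem hq)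
      have hmap : (t.map (fun p => if (p.1 == k) = true then (k, v) else p)) = t.map id :=
        List.map_congr_left (fun q hq => by simp [hne q hq])
      rw [hmap, List.map_id]
    · simp only [List.find?_cons, hp, Bool.false_eq_true, if_false] at h
      simp only [List.map_cons, hp, Bool.false_eq_true, if_false]
      rw [ih hnd.2 h]

theorem pv_insert_get_self {κ ν : Type} [BEq κ] [LawfulBEq κ] (d : PySem.Dict κ ν) (k : κ) (v : ν)
    (hnd : d.keys.Nodup) (h : d.get? k = some v) : d.insert k v = d := by
  have hc : d.contains k = true := by
    rw [PySem.Dict.contains_eq_isSome_get?, h]; rfl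
  have hfind : d.items.find? (fun p => p.1 == k) = some (k, v) := by
    simp only [PySem.Dict.get?] at h
    obtain ⟨q, hq1, hq2⟩ := Option.map_eq_some_iff.mp h
    have hsat := List.find?_some hq1
    have hqk : q.1 = k := beq_iff_eq.mp hsat
    rw [hq1]
    congr 1
    exact Prod.ext hqk hq2
  simp only [PySem.Dict.insert, PySem.Dict.contains] at hc ⊢
  simp only [hc, if_true]
  obtain ⟨items⟩ := d
  simp only [PySem.Dict.keys] at hnd
  congr 1
  exact pv_map_find_id items k v (by simpa using hnd) hfind

theorem pvInsFold {β : Type} (l : List β) (topic : Int) (p : β → Prop) [DecidablePred p]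
    (u : PySem.Dict String Int → β → PySem.Dict String Int)
    (ck : PySem.Dict Int (PySem.Dict String Int))
    (hc : ck.contains topic = true) (hnd : ck.keys.Nodup) :
    l.foldl (fun ck x => if p x then ck.insert topic (u (ck.getD topic PySem.Dict.empty) x) else ck) ck
      = ck.insert topic (l.foldl (fun c x => if p x then u c x else c) (ck.getD topic PySem.Dict.empty)) := by
  induction l generalizing ck with
  | nil =>
    simp only [List.foldl_nil]
    rw [PySem.Dict.contains_eq_isSome_get?] at hc
    obtain ⟨v, hv⟩ := Option.isSome_iff_exists.mp hc
    rw [PySem.Dict.getD_eq_get?_getD, hv]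
    exact (pv_insert_get_self ck topic v hnd hv).symm
  | cons x t ih =>
    simp only [List.foldl_cons]
    by_cases hp : p x
    · simp only [hp, if_true]
      rw [ih _ (PySem.Dict.contains_insert_self _ _ _) (PySem.Dict.nodup_keys_insert _ _ _ hnd)]
      rw [PySem.Dict.getD_insert_self, PySem.Dict.insert_insert_self]
    · simp only [hp, if_false]
      exact ih ck hc hnd

def pvMask (msk : List Bool) (j : Int) : Bool := PySem.List.pyGetD msk j false
def pvKey (ws : List String) (j : Int) : String := PySem.List.pyGetD ws j ""
def pvCnt (msk : List Bool) (a b : Int) : Int :=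
  (((PySem.List.pyRange a b 1).filter (fun i => pvMask msk i)).length : Int)
def pvCg (hs : List Int) (w j : Int) : Int :=
  ((hs.filter (fun i => decide (j - w ≤ i) && decide (i ≤ j + w))).length : Int)
def pvStepG (ws : List String) (msk : List Bool) (hs : List Int) (w : Int)
    (c : PySem.Dict String Int) (j : Int) : PySem.Dict String Int :=
  if pvMask msk j = false ∧ pvCg hs w j ≠ 0 then pvAdd c (pvKey ws j) (pvCg hs w j) else c
def pvSegG (ws : List String) (msk : List Bool) (hs : List Int) (w a b : Int)
    (c : PySem.Dict String Int) : PySem.Dict String Int :=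
  (PySem.List.pyRange a b 1).foldl (pvStepG ws msk hs w) c
def pvNbrs (msk : List Bool) (w n i : Int) : List Int :=
  (PySem.List.pyRange (max 0 (i - w)) (min n (i + w + 1)) 1).filter (fun j => decide (pvMask msk j = false))
def pvUpd (ws : List String) (msk : List Bool) (w : Int) (c : PySem.Dict String Int) (i : Int) :
    PySem.Dict String Int :=
  (pvNbrs msk w (ws.length : Int) i).foldl (fun c j => pvAdd c (pvKey ws j) 1) c

theorem pvCg_nonneg (hs : List Int) (w j : Int) : 0 ≤ pvCg hs w j := Int.natCast_nonneg _

theorem pvCg_append (t : List Int) (iM w j : Int) :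
    pvCg (t ++ [iM]) w j = pvCg t w j + (if j - w ≤ iM ∧ iM ≤ j + w then 1 else 0) := by
  unfold pvCg
  rw [List.filter_append, List.length_append]
  push_cast
  congr 1
  by_cases h : j - w ≤ iM ∧ iM ≤ j + w
  · rw [if_pos h]
    have he : (List.filter (fun i => decide (j - w ≤ i) && decide (i ≤ j + w)) [iM]) = [iM] := by
      simp only [List.filter_cons, List.filter_nil]
      rw [decide_eq_true h.1, decide_eq_true h.2]
      rfl
    rw [he]; rfl
  · rw [if_neg h]
    have he : (List.filter (fun i => decide (j - w ≤ i) && decide (i ≤ j + w)) [iM]) = [] := by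
      rw [List.filter_eq_nil_iff]
      intro a ha
      simp only [List.mem_singleton] at ha
      subst ha
      simp only [Bool.and_eq_true, decide_eq_true_eq]
      exact fun hc => h hc
    rw [he]; rfl

theorem pvCg_pos (t : List Int) (w j i : Int) (hi : i ∈ t) (h1 : j - w ≤ i) (h2 : i ≤ j + w) :
    pvCg t w j ≠ 0 := by
  unfold pvCg
  have : i ∈ t.filter (fun i => decide (j - w ≤ i) && decide (i ≤ j + w)) := by
    rw [List.mem_filter]
    exact ⟨hi, by simp [h1, h2]⟩
  have hlen := List.length_pos_of_mem this
  omega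

theorem pvCg_zero (t : List Int) (w j : Int) (h : ∀ i ∈ t, ¬(j - w ≤ i ∧ i ≤ j + w)) :
    pvCg t w j = 0 := by
  unfold pvCg
  rw [List.filter_eq_nil_iff.mpr]
  · rfl
  · intro i hi
    simp only [Bool.and_eq_true, decide_eq_true_eq]
    exact fun hc => h i hi hc

theorem pvSegG_skip (ws : List String) (msk : List Bool) (hs : List Int) (w a b : Int)
    (c : PySem.Dict String Int) (h : ∀ j, a ≤ j → j < b → pvCg hs w j = 0) :
    pvSegG ws msk hs w a b c = c := by
  unfold pvSegG
  rw [PySem.List.foldl_congr_mem _ _ (fun c _ => c) c (by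
    intro acc j hj
    rw [PySem.List.mem_pyRange_one] at hj
    unfold pvStepG
    rw [if_neg]
    intro hcon
    exact hcon.2 (h j hj.1 hj.2))]
  exact PySem.List.foldl_ignore _ _

theorem pv_sorted_le_getLast (l : List Int) (h : l.Pairwise (· < ·)) (hne : l ≠ []) :
    ∀ x ∈ l, x ≤ l.getLast hne := by
  induction l with
  | nil => exact fun x hx => absurd hx (by simp)
  | cons a t ih =>
    intro x hx
    rcases List.mem_cons.mp hx with rfl | hxt
    · cases t with
      | nil => simp
      | cons b s =>
        rw [List.getLast_cons (by simp)]
        have hlt := (List.pairwise_cons.mp h).1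
        have hmem : (b :: s).getLast (by simp) ∈ b :: s := List.getLast_mem _
        exact le_of_lt (hlt _ hmem)
    · cases t with
      | nil => simp at hxt
      | cons b s =>
        rw [List.getLast_cons (by simp)]
        exact ih (List.pairwise_cons.mp h).2 (by simp) x hxt

theorem pvStepG_congr (ws : List String) (msk : List Bool) (hs hs' : List Int) (w j : Int)
    (c : PySem.Dict String Int) (hcg : pvCg hs w j = pvCg hs' w j) :
    pvStepG ws msk hs w c j = pvStepG ws msk hs' w c j := by
  unfold pvStepG; rw [hcg]

theorem pvSegG_as_filtered (ws : List String) (msk : List Bool) (hs : List Int) (w a b : Int)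
    (v : Int → Int) (c : PySem.Dict String Int)
    (hv : ∀ j, a ≤ j → j < b → pvCg hs w j = v j ∧ v j ≠ 0) :
    pvSegG ws msk hs w a b c
      = ((PySem.List.pyRange a b 1).filter (fun j => decide (pvMask msk j = false))).foldl
          (fun c j => pvAdd c (pvKey ws j) (v j)) c := by
  unfold pvSegG
  rw [PySem.List.foldl_congr_mem _ _
      (fun c j => if pvMask msk j = false then pvAdd c (pvKey ws j) (v j) else c) c (by
    intro acc j hj
    rw [PySem.List.mem_pyRange_one] at hj
    obtain ⟨h1, h2⟩ := hv j hj.1 hj.2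
    show pvStepG ws msk hs w acc j
        = if pvMask msk j = false then pvAdd acc (pvKey ws j) (v j) else acc
    unfold pvStepG
    by_cases hm : pvMask msk j = false
    · rw [if_pos ⟨hm, by rw [h1]; exact h2⟩, if_pos hm, h1]
    · rw [if_neg (fun hc => hm hc.1), if_neg hm])]
  exact PySem.List.foldl_ite_eq_foldl_filter _ _ _ _

theorem pvStepMain (ws : List String) (msk : List Bool) (w : Int) (hw : 0 ≤ w)
    (t : List Int) (iM M : Int)
    (hiM0 : 0 ≤ iM) (hiMn : iM < (ws.length : Int))
    (hM1 : max 0 (iM - w) ≤ M) (hM2 : M ≤ min (ws.length : Int) (iM + w + 1))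
    (K2 : ∀ j, max 0 (iM - w) ≤ j → j < M → pvCg t w j ≠ 0)
    (K1 : ∀ j, M ≤ j → j < min (ws.length : Int) (iM + w + 1) → pvCg t w j = 0)
    (K4 : ∀ j, min (ws.length : Int) (iM + w + 1) ≤ j → j < (ws.length : Int) → pvCg t w j = 0)
    (c : PySem.Dict String Int) :
    pvSegG ws msk (t ++ [iM]) w 0 (ws.length : Int) c
      = pvUpd ws msk w (pvSegG ws msk t w 0 (ws.length : Int) c) iM := by
  have hcg' : ∀ j, 0 ≤ j → j < (ws.length : Int) → pvCg (t ++ [iM]) w j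
      = pvCg t w j + (if max 0 (iM - w) ≤ j ∧ j < min (ws.length : Int) (iM + w + 1) then 1 else 0) := by
    intro j h1 h2
    rw [pvCg_append]
    congr 1
    by_cases hc : max 0 (iM - w) ≤ j ∧ j < min (ws.length : Int) (iM + w + 1)
    · rw [if_pos hc, if_pos (by omega)]
    · rw [if_neg hc, if_neg (by omega)]
  have hsplit : PySem.List.pyRange 0 (ws.length : Int) 1
      = PySem.List.pyRange 0 (max 0 (iM - w)) 1 ++ (PySem.List.pyRange (max 0 (iM - w)) M 1
        ++ (PySem.List.pyRange M (min (ws.length : Int) (iM + w + 1)) 1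
            ++ PySem.List.pyRange (min (ws.length : Int) (iM + w + 1)) (ws.length : Int) 1)) := by
    rw [← PySem.List.pyRange_one_append M (min (ws.length : Int) (iM + w + 1)) (ws.length : Int) (by omega) (by omega),
        ← PySem.List.pyRange_one_append (max 0 (iM - w)) M (ws.length : Int) (by omega) (by omega),
        ← PySem.List.pyRange_one_append 0 (max 0 (iM - w)) (ws.length : Int) (by omega) (by omega)]
  have hLHS : pvSegG ws msk (t ++ [iM]) w 0 (ws.length : Int) c
      = pvSegG ws msk (t ++ [iM]) w (min (ws.length : Int) (iM + w + 1)) (ws.length : Int)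
          (pvSegG ws msk (t ++ [iM]) w M (min (ws.length : Int) (iM + w + 1))
            (pvSegG ws msk (t ++ [iM]) w (max 0 (iM - w)) M
              (pvSegG ws msk (t ++ [iM]) w 0 (max 0 (iM - w)) c))) := by
    unfold pvSegG
    rw [hsplit, List.foldl_append, List.foldl_append, List.foldl_append]
  have hRHS0 : pvSegG ws msk t w 0 (ws.length : Int) c
      = pvSegG ws msk t w (min (ws.length : Int) (iM + w + 1)) (ws.length : Int)
          (pvSegG ws msk t w M (min (ws.length : Int) (iM + w + 1))
            (pvSegG ws msk t w (max 0 (iM - w)) M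
              (pvSegG ws msk t w 0 (max 0 (iM - w)) c))) := by
    unfold pvSegG
    rw [hsplit, List.foldl_append, List.foldl_append, List.foldl_append]
  have hE1 : pvSegG ws msk (t ++ [iM]) w 0 (max 0 (iM - w)) c
      = pvSegG ws msk t w 0 (max 0 (iM - w)) c := by
    unfold pvSegG
    apply PySem.List.foldl_congr_mem
    intro acc j hj
    rw [PySem.List.mem_pyRange_one] at hj
    exact pvStepG_congr _ _ _ _ _ _ _ (by
      rw [hcg' j (by omega) (by omega), if_neg (by omega)]; omega)
  have hE4t : ∀ d, pvSegG ws msk t w (min (ws.length : Int) (iM + w + 1)) (ws.length : Int) d = d :=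
    fun d => pvSegG_skip _ _ _ _ _ _ _ (fun j h1 h2 => K4 j h1 h2)
  have hE4 : ∀ d, pvSegG ws msk (t ++ [iM]) w (min (ws.length : Int) (iM + w + 1)) (ws.length : Int) d = d :=
    fun d => pvSegG_skip _ _ _ _ _ _ _ (fun j h1 h2 => by
      rw [hcg' j (by omega) (by omega), if_neg (by omega), K4 j h1 h2]
      omega)
  have hE3t : ∀ d, pvSegG ws msk t w M (min (ws.length : Int) (iM + w + 1)) d = d :=
    fun d => pvSegG_skip _ _ _ _ _ _ _ (fun j h1 h2 => K1 j h1 h2)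
  have hE2' : ∀ d, pvSegG ws msk (t ++ [iM]) w (max 0 (iM - w)) M d
      = ((PySem.List.pyRange (max 0 (iM - w)) M 1).filter (fun j => decide (pvMask msk j = false))).foldl
          (fun c j => pvAdd c (pvKey ws j) (pvCg t w j + 1)) d := fun d =>
    pvSegG_as_filtered _ _ _ _ _ _ (fun j => pvCg t w j + 1) d (by
      intro j h1 h2
      constructor
      · rw [hcg' j (by omega) (by omega), if_pos (by omega)]
      · have := pvCg_nonneg t w j
        show pvCg t w j + 1 ≠ 0
        omega)
  have hE2t : ∀ d, pvSegG ws msk t w (max 0 (iM - w)) M d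
      = ((PySem.List.pyRange (max 0 (iM - w)) M 1).filter (fun j => decide (pvMask msk j = false))).foldl
          (fun c j => pvAdd c (pvKey ws j) (pvCg t w j)) d := fun d =>
    pvSegG_as_filtered _ _ _ _ _ _ (fun j => pvCg t w j) d
      (fun j h1 h2 => ⟨rfl, K2 j h1 h2⟩)
  have hE3' : ∀ d, pvSegG ws msk (t ++ [iM]) w M (min (ws.length : Int) (iM + w + 1)) d
      = ((PySem.List.pyRange M (min (ws.length : Int) (iM + w + 1)) 1).filter (fun j => decide (pvMask msk j = false))).foldl
          (fun c j => pvAdd c (pvKey ws j) 1) d := fun d =>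
    pvSegG_as_filtered _ _ _ _ _ _ (fun _ => 1) d (by
      intro j h1 h2
      constructor
      · rw [hcg' j (by omega) (by omega), if_pos (by omega), K1 j h1 h2]
        exact (by norm_num : (0:Int) + 1 = 1)
      · show (1:Int) ≠ 0
        omega)
  have hupd : ∀ d, pvUpd ws msk w d iM
      = ((PySem.List.pyRange M (min (ws.length : Int) (iM + w + 1)) 1).filter (fun j => decide (pvMask msk j = false))).foldl
          (fun c j => pvAdd c (pvKey ws j) 1)
          (((PySem.List.pyRange (max 0 (iM - w)) M 1).filter (fun j => decide (pvMask msk j = false))).foldl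
            (fun c j => pvAdd c (pvKey ws j) 1) d) := by
    intro d
    unfold pvUpd pvNbrs
    rw [PySem.List.pyRange_one_append (max 0 (iM - w)) M (min (ws.length : Int) (iM + w + 1)) (by omega) (by omega)]
    rw [List.filter_append, List.foldl_append]
  rw [hLHS, hRHS0, hE1, hE4, hE4t, hE3t, hupd, hE2t, hE2', hE3']
  rw [pvMerge _ (pvKey ws) (fun j => pvCg t w j)]

theorem pvCg_nil (w j : Int) : pvCg [] w j = 0 := rfl

theorem pvTA (ws : List String) (msk : List Bool) (w : Int) (hw : 0 ≤ w) (hs : List Int)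
    (hsort : hs.Pairwise (· < ·))
    (hbnd : ∀ i ∈ hs, 0 ≤ i ∧ i < (ws.length : Int)) :
    ∀ c, hs.foldl (pvUpd ws msk w) c = pvSegG ws msk hs w 0 (ws.length : Int) c := by
  induction hs using List.reverseRecOn with
  | nil =>
    intro c
    rw [List.foldl_nil, pvSegG_skip _ _ _ _ _ _ _ (fun j _ _ => pvCg_nil w j)]
  | append_singleton t iM ih =>
    intro c
    obtain ⟨pt, -, hcross⟩ := List.pairwise_append.mp hsort
    have hcross' : ∀ x ∈ t, x < iM := fun x hx => hcross x hx iM (by simp)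
    have hiMb := hbnd iM (by simp)
    have hbt : ∀ i ∈ t, 0 ≤ i ∧ i < (ws.length : Int) :=
      fun i hi => hbnd i (by simp [hi])
    rw [List.foldl_append, List.foldl_cons, List.foldl_nil, ih pt hbt c]
    by_cases ht : t = []
    · subst ht
    
      refine (pvStepMain ws msk w hw [] iM (max 0 (iM - w)) hiMb.1 hiMb.2 (by omega) (by omega)
        (fun j h1 h2 => absurd h2 (by omega)) (fun j _ _ => pvCg_nil w j) (fun j _ _ => pvCg_nil w j) c).symm
    · have htmax_mem : t.getLast ht ∈ t := List.getLast_mem ht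
      have htmax_lt : t.getLast ht < iM := hcross' _ htmax_mem
      have htmax_ub : ∀ x ∈ t, x ≤ t.getLast ht := pv_sorted_le_getLast t pt ht
      refine (pvStepMain ws msk w hw t iM
        (max (max 0 (iM - w)) (min (min (ws.length : Int) (iM + w + 1)) (t.getLast ht + w + 1)))
        hiMb.1 hiMb.2 (by omega) (by omega)
        (fun j h1 h2 => pvCg_pos t w j (t.getLast ht) htmax_mem (by omega) (by omega))
        (fun j h1 h2 => pvCg_zero t w j (by
          intro i hi hcon
          have hub := htmax_ub i hi
          omega))
        (fun j h1 h2 => pvCg_zero t w j (by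
          intro i hi hcon
          have hlt := hcross' i hi
          omega)) c).symm

def pvC (msk : List Bool) (w j : Int) : Int :=
  pvCnt msk (max 0 (j - w)) (min (msk.length : Int) (j + w + 1))

theorem pvCg_full (msk : List Bool) (w j : Int) (hw : 0 ≤ w) (hj0 : 0 ≤ j)
    (hjn : j < (msk.length : Int)) :
    pvCg ((PySem.List.pyRange 0 (msk.length : Int) 1).filter (fun i => pvMask msk i)) w j
      = pvC msk w j := by
  unfold pvCg pvC pvCnt
  rw [List.filter_filter]
  rw [PySem.List.pyRange_one_append 0 (max 0 (j - w)) (msk.length : Int) (by omega) (by omega)]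
  rw [PySem.List.pyRange_one_append (max 0 (j - w)) (min (msk.length : Int) (j + w + 1)) (msk.length : Int) (by omega) (by omega)]
  rw [List.filter_append, List.filter_append, List.length_append, List.length_append]
  have h1 : (PySem.List.pyRange 0 (max 0 (j - w)) 1).filter
      (fun a => (decide (j - w ≤ a) && decide (a ≤ j + w)) && pvMask msk a) = [] := by
    rw [List.filter_eq_nil_iff]
    intro a ha
    rw [PySem.List.mem_pyRange_one] at ha
    simp only [Bool.and_eq_true, decide_eq_true_eq]
    omega
  have h3 : (PySem.List.pyRange (min (msk.length : Int) (j + w + 1)) (msk.length : Int) 1).filter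
      (fun a => (decide (j - w ≤ a) && decide (a ≤ j + w)) && pvMask msk a) = [] := by
    rw [List.filter_eq_nil_iff]
    intro a ha
    rw [PySem.List.mem_pyRange_one] at ha
    simp only [Bool.and_eq_true, decide_eq_true_eq]
    omega
  have h2 : (PySem.List.pyRange (max 0 (j - w)) (min (msk.length : Int) (j + w + 1)) 1).filter
      (fun a => (decide (j - w ≤ a) && decide (a ≤ j + w)) && pvMask msk a)
      = (PySem.List.pyRange (max 0 (j - w)) (min (msk.length : Int) (j + w + 1)) 1).filter
          (fun a => pvMask msk a) := by
    apply List.filter_congr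
    intro a ha
    rw [PySem.List.mem_pyRange_one] at ha
    rw [decide_eq_true (by omega : j - w ≤ a), decide_eq_true (by omega : a ≤ j + w)]
    rfl
  rw [h1, h2, h3]
  simp

theorem pvCnt_snoc (msk : List Bool) (a b : Int) (hab : a ≤ b) :
    pvCnt msk a (b + 1) = pvCnt msk a b + (if pvMask msk b then 1 else 0) := by
  unfold pvCnt
  rw [PySem.List.pyRange_one_succ_right hab, List.filter_append, List.length_append]
  by_cases hm : pvMask msk b
  · rw [if_pos hm]
    have : List.filter (fun i => pvMask msk i) [b] = [b] := by
      simp [hm]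
    rw [this]
    simp only [List.length_singleton]
    push_cast
    omega
  · rw [if_neg hm]
    have : List.filter (fun i => pvMask msk i) [b] = [] := by
      simp [hm]
    rw [this]
    simp
theorem pvCnt_cons (msk : List Bool) (a b : Int) (hab : a < b) :
    pvCnt msk a b = (if pvMask msk a then 1 else 0) + pvCnt msk (a + 1) b := by
  unfold pvCnt
  rw [PySem.List.pyRange_one_cons hab, List.filter_cons]
  by_cases hm : pvMask msk a
  · rw [if_pos hm]
    simp only [hm, if_true, List.length_cons]
    push_cast
    ring
  · rw [if_neg hm]
    simp [hm]

theorem pvSlide (msk : List Bool) (w j : Int) (hw : 0 ≤ w) (h1 : 1 ≤ j)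
    (h2 : j < (msk.length : Int)) :
    (let c1 := if j + w < (msk.length : Int) ∧ pvMask msk (j + w) = true
        then pvC msk w (j - 1) + 1 else pvC msk w (j - 1);
     if 0 ≤ j - w - 1 ∧ pvMask msk (j - w - 1) = true then c1 - 1 else c1)
      = pvC msk w j := by
  have hstepR : (if j + w < (msk.length : Int) ∧ pvMask msk (j + w) = true
        then pvC msk w (j - 1) + 1 else pvC msk w (j - 1))
      = pvCnt msk (max 0 (j - 1 - w)) (min (msk.length : Int) (j + w + 1)) := by
    unfold pvC
    by_cases hr : j + w < (msk.length : Int)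
    · have e1 : min (msk.length : Int) (j - 1 + w + 1) = j + w := by omega
      have e2 : min (msk.length : Int) (j + w + 1) = j + w + 1 := by omega
      rw [e1, e2, pvCnt_snoc msk _ (j + w) (by omega)]
      by_cases hm : pvMask msk (j + w) = true
      · rw [if_pos ⟨hr, hm⟩, if_pos hm]
      · rw [if_neg (fun hc => hm hc.2), if_neg hm]
        ring
    · have e1 : min (msk.length : Int) (j - 1 + w + 1) = min (msk.length : Int) (j + w + 1) := by omega
      rw [e1, if_neg (fun hc => hr hc.1)]
  have hstepL : (if 0 ≤ j - w - 1 ∧ pvMask msk (j - w - 1) = true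
        then pvCnt msk (max 0 (j - 1 - w)) (min (msk.length : Int) (j + w + 1)) - 1
        else pvCnt msk (max 0 (j - 1 - w)) (min (msk.length : Int) (j + w + 1)))
      = pvCnt msk (max 0 (j - w)) (min (msk.length : Int) (j + w + 1)) := by
    by_cases hl : 0 ≤ j - w - 1
    · have e1 : max 0 (j - 1 - w) = j - w - 1 := by omega
      have e2 : max 0 (j - w) = (j - w - 1) + 1 := by omega
      rw [e1, e2, pvCnt_cons msk (j - w - 1) _ (by omega)]
      by_cases hm : pvMask msk (j - w - 1) = true
      · rw [if_pos ⟨hl, hm⟩, if_pos hm]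
        ring
      · rw [if_neg (fun hc => hm hc.2), if_neg hm]
        ring
    · have e1 : max 0 (j - 1 - w) = 0 := by omega
      have e2 : max 0 (j - w) = 0 := by omega
      rw [e1, e2, if_neg (fun hc => hl hc.1)]
  show (if 0 ≤ j - w - 1 ∧ pvMask msk (j - w - 1) = true
      then (if j + w < (msk.length : Int) ∧ pvMask msk (j + w) = true
        then pvC msk w (j - 1) + 1 else pvC msk w (j - 1)) - 1
      else (if j + w < (msk.length : Int) ∧ pvMask msk (j + w) = true
        then pvC msk w (j - 1) + 1 else pvC msk w (j - 1))) = pvC msk w j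
  rw [hstepR, hstepL]
  rfl

theorem pvCountTake (msk : List Bool) : ∀ (k : Nat),
    ((msk.take k).countP (fun b => b) : Int) = pvCnt msk 0 (k : Int) := by
  intro k
  induction k with
  | zero => rfl
  | succ k ih =>
    rw [List.take_add_one, List.countP_append]
    have hsnoc : pvCnt msk 0 ((k : Int) + 1) = pvCnt msk 0 (k : Int) + (if pvMask msk k then 1 else 0) :=
      pvCnt_snoc msk 0 k (by positivity)
    push_cast
    push_cast at ih
    rw [ih]
    rw [hsnoc]
    congr 1
    by_cases hk : k < msk.length
    · have : msk[k]? = some msk[k] := List.getElem?_eq_getElem hk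
      rw [this]
      have hm : pvMask msk (k : Int) = msk[k] := by
        unfold pvMask
        rw [PySem.List.pyGetD_natCast]
        exact List.getD_eq_getElem msk false hk
      by_cases hv : msk[k] = true
      · simp [hv, hm]
      · simp only [Bool.not_eq_true] at hv
        simp [hv, hm]
    · have : msk[k]? = none := List.getElem?_eq_none (by omega)
      rw [this]
      have hm : pvMask msk (k : Int) = false := by
        unfold pvMask
        rw [PySem.List.pyGetD_natCast]
        exact List.getD_eq_default msk false (by omega)
      simp [hm]

theorem pvCnt0 (msk : List Bool) (w : Int) (hw : 0 ≤ w) :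
    ((PySem.List.slice msk (some 0) (some (min (msk.length : Int) (w + 1)))).map
      (fun b => if b then (1 : Int) else 0)).sum = pvC msk w 0 := by
  have hm0 : (0 : Int) ≤ min (msk.length : Int) (w + 1) := by omega
  rw [PySem.List.slice_zero_start, PySem.List.slice_to _ hm0]
  have hsum := PySem.List.sum_map_ite_one_zero (fun b : Bool => b) (msk.take (min (msk.length : Int) (w + 1)).toNat)
  simp only at hsum
  rw [hsum, pvCountTake msk (min (msk.length : Int) (w + 1)).toNat]
  unfold pvC
  congr 1
  · omega
  · omega

def pvStepB (ws : List String) (msk : List Bool) (w : Int) (s : Int × PySem.Dict String Int)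
    (j : Int) : Int × PySem.Dict String Int :=
  let cnt :=
    if 0 < j then
      let cnt := if j + w < (ws.length : Int) ∧ PySem.List.pyGetD msk (j + w) false = true
        then s.1 + 1 else s.1
      if 0 ≤ j - w - 1 ∧ PySem.List.pyGetD msk (j - w - 1) false = true then cnt - 1 else cnt
    else s.1
  let ctr :=
    if PySem.List.pyGetD msk j false = false ∧ cnt ≠ 0 then
      s.2.modify (PySem.List.pyGetD ws j "") 0 (· + cnt)
    else s.2
  (cnt, ctr)

def pvStepC (ws : List String) (msk : List Bool) (w : Int) (c : PySem.Dict String Int)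
    (j : Int) : PySem.Dict String Int :=
  if PySem.List.pyGetD msk j false = false ∧ pvC msk w j ≠ 0 then
    pvAdd c (PySem.List.pyGetD ws j "") (pvC msk w j)
  else c

theorem pvStepB_at (ws : List String) (msk : List Bool) (w j : Int) (hw : 0 ≤ w)
    (hlen : msk.length = ws.length) (h1 : 1 ≤ j) (h2 : j < (ws.length : Int))
    (c : PySem.Dict String Int) :
    pvStepB ws msk w (pvC msk w (j - 1), c) j = (pvC msk w j, pvStepC ws msk w c j) := by
  have hl : (ws.length : Int) = (msk.length : Int) := by rw [hlen]
  have hcnt : (if 0 < j then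
      (if 0 ≤ j - w - 1 ∧ PySem.List.pyGetD msk (j - w - 1) false = true then
        (if j + w < (ws.length : Int) ∧ PySem.List.pyGetD msk (j + w) false = true
          then pvC msk w (j - 1) + 1 else pvC msk w (j - 1)) - 1
        else (if j + w < (ws.length : Int) ∧ PySem.List.pyGetD msk (j + w) false = true
          then pvC msk w (j - 1) + 1 else pvC msk w (j - 1)))
      else pvC msk w (j - 1)) = pvC msk w j := by
    rw [if_pos (by omega : (0:Int) < j), hl]
    exact pvSlide msk w j hw h1 (by omega)
  unfold pvStepB
  show (_, _) = _
  rw [hcnt]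
  rfl

theorem pvTB_aux (ws : List String) (msk : List Bool) (w : Int) (hw : 0 ≤ w)
    (hlen : msk.length = ws.length) : ∀ (m : Nat) (j : Int), 1 ≤ j →
    j + (m : Int) = (ws.length : Int) → ∀ c,
    ((PySem.List.pyRange j (ws.length : Int) 1).foldl (pvStepB ws msk w) (pvC msk w (j - 1), c)).2
      = (PySem.List.pyRange j (ws.length : Int) 1).foldl (pvStepC ws msk w) c := by
  intro m
  induction m with
  | zero =>
    intro j hj hjm c
    rw [PySem.List.pyRange_one_eq_nil (by omega)]
    rfl
  | succ m ih =>
    intro j hj hjm c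
    rw [PySem.List.pyRange_one_cons (by omega : j < (ws.length : Int))]
    rw [List.foldl_cons, List.foldl_cons]
    rw [pvStepB_at ws msk w j hw hlen hj (by omega) c]
    have hj1 : j + 1 - 1 = j := by omega
    have := ih (j + 1) (by omega) (by push_cast at hjm; omega) (pvStepC ws msk w c j)
    rw [hj1] at this
    exact this

theorem pvSetContains (l : List String) (x : String) :
    PySem.Set.contains (PySem.Set.ofList l) x = l.contains x := by
  by_cases h : x ∈ l
  · rw [(PySem.Set.contains_iff _ _).mpr ((PySem.Set.mem_ofList _ _).mpr h),
        List.contains_iff_mem.mpr h]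
  · rw [Bool.eq_false_iff.mpr (fun hc => h ((PySem.Set.mem_ofList _ _).mp ((PySem.Set.contains_iff _ _).mp hc))),
        Bool.eq_false_iff.mpr (fun hc => h (List.contains_iff_mem.mp hc))]

theorem pvGetD_cons_succ {α : Type} (x : α) (t : List α) (k : Int) (hk : 0 ≤ k) (d : α) :
    PySem.List.pyGetD (x :: t) (k + 1) d = PySem.List.pyGetD t k d := by
  obtain ⟨m, hm⟩ := Int.eq_ofNat_of_zero_le hk
  subst hm
  unfold PySem.List.pyGetD
  rw [PySem.List.pyGet?_cons_succ]

theorem pvEnum (ws : List String) : ∀ (s : Int),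
    PySem.List.enumerate ws s
      = (PySem.List.pyRange s (s + (ws.length : Int)) 1).map
          (fun i => (i, PySem.List.pyGetD ws (i - s) "")) := by
  induction ws with
  | nil =>
    intro s
    rw [show ((([] : List String).length : Int)) = 0 by simp, add_zero,
      PySem.List.pyRange_one_eq_nil (le_refl s)]
    rfl
  | cons x t ih =>
    intro s
    have hcons : PySem.List.enumerate (x :: t) s = (s, x) :: PySem.List.enumerate t (s + 1) := rfl
    rw [hcons, ih (s + 1)]
    rw [PySem.List.pyRange_one_cons (by simp only [List.length_cons]; push_cast; omega : s < s + ((x :: t).length : Int))]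
    rw [List.map_cons]
    congr 1
    · rw [sub_self, PySem.List.pyGetD_zero_cons]
    · have hr : s + 1 + (t.length : Int) = s + ((x :: t).length : Int) := by simp only [List.length_cons]; push_cast; omega
      rw [← hr]
      apply List.map_congr_left
      intro i hi
      rw [PySem.List.mem_pyRange_one] at hi
      have h1 : i - s = (i - (s + 1)) + 1 := by omega
      rw [h1, pvGetD_cons_succ x t (i - (s + 1)) (by omega)]

theorem pvSliceMap (ws : List String) (a b : Int) (h0 : 0 ≤ a) (hab : a ≤ b)
    (hbn : b ≤ (ws.length : Int)) :
    PySem.List.slice ws (some a) (some b)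
      = (PySem.List.pyRange a b 1).map (fun j => PySem.List.pyGetD ws j "") := by
  rw [PySem.List.slice_toNat ws h0 (by omega)]
  apply List.ext_getElem
  · simp only [List.length_take, List.length_drop, List.length_map,
      PySem.List.length_pyRange_one]
    omega
  · intro i hi1 hi2
    rw [List.getElem_take, List.getElem_drop]
    rw [List.getElem_map, PySem.List.getElem_pyRange_one]
    rw [PySem.List.pyGetD_eq_getElem ws "" (by omega) (by
      simp only [List.length_take, List.length_drop] at hi1
      omega)]
    congr 1
    simp only [List.length_take, List.length_drop] at hi1
    omega

theorem pvMask_eq (ws : List String) (hterms : List String) (i : Int)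
    (h0 : 0 ≤ i) (hn : i < (ws.length : Int)) :
    pvMask (ws.map (fun x => hterms.contains x)) i = hterms.contains (PySem.List.pyGetD ws i "") := by
  unfold pvMask
  rw [PySem.List.pyGetD_eq_getElem _ false h0 (by simpa using hn),
      PySem.List.pyGetD_eq_getElem ws "" h0 hn]
  rw [List.getElem_map]

theorem pvPerTextA (ws : List String) (hterms : List String) (w : Int) (hw : 0 ≤ w)
    (c : PySem.Dict String Int) :
    (PySem.List.enumerate ws).foldl (fun c iw =>
      if hterms.contains iw.2 = true then
        ((PySem.List.slice ws (some (max 0 (iw.1 - w))) (some iw.1) ++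
          PySem.List.slice ws (some (iw.1 + 1)) (some (min (PySem.List.len ws) (iw.1 + w + 1)))).filter
            (fun x => !(hterms.contains x))).foldl (fun c x => c.modify x 0 (· + 1)) c
      else c) c
    = (PySem.List.pyRange 0 (ws.length : Int) 1).foldl
        (pvStepC ws (ws.map (fun x => hterms.contains x)) w) c := by
  have hlen : (ws.map (fun x => hterms.contains x)).length = ws.length := List.length_map ..
  simp only [PySem.List.len_eq]
  rw [pvEnum ws 0, List.foldl_map]
  simp only [zero_add, sub_zero]
  rw [PySem.List.foldl_congr_mem _ _
      (fun c i => if pvMask (ws.map (fun x => hterms.contains x)) i = true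
        then pvUpd ws (ws.map (fun x => hterms.contains x)) w c i else c) c (by
    intro acc i hi
    rw [PySem.List.mem_pyRange_one] at hi
    show _ = (if pvMask (ws.map (fun x => hterms.contains x)) i = true
      then pvUpd ws (ws.map (fun x => hterms.contains x)) w acc i else acc)
    rw [pvMask_eq ws hterms i hi.1 hi.2]
    by_cases hg : hterms.contains (PySem.List.pyGetD ws i "") = true
    · rw [if_pos hg, if_pos hg]
      -- convert the slice/filter/fold to pvUpd
      rw [pvSliceMap ws (max 0 (i - w)) i (by omega) (by omega) (by omega),
          pvSliceMap ws (i + 1) (min ((ws.length : Int)) (i + w + 1)) (by omega)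
            (by show i + 1 ≤ min ((ws.length : Int)) (i + w + 1); omega)
            (by show min ((ws.length : Int)) (i + w + 1) ≤ (ws.length : Int); omega)]
      rw [← List.map_append, List.filter_map, List.foldl_map]
      unfold pvUpd pvNbrs
      have hfe : ∀ js : List Int, (∀ j ∈ js, 0 ≤ j ∧ j < (ws.length : Int)) →
          js.filter ((fun x => !(hterms.contains x)) ∘ (fun j => PySem.List.pyGetD ws j ""))
            = js.filter (fun j => decide (pvMask (ws.map (fun x => hterms.contains x)) j = false)) := by
        intro js hjs
        apply List.filter_congr
        intro j hj
        obtain ⟨hj0, hjn⟩ := hjs j hj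
        simp only [Function.comp]
        rw [pvMask_eq ws hterms j hj0 hjn, Bool.decide_eq_false]
      rw [hfe _ (by
        intro j hj
        rcases List.mem_append.mp hj with hj | hj <;> rw [PySem.List.mem_pyRange_one] at hj <;>
          constructor <;> omega)]
      have hmi : (decide (pvMask (ws.map (fun x => hterms.contains x)) i = false)) = false := by
        rw [pvMask_eq ws hterms i hi.1 hi.2, hg]
        rfl
      have hsplit2 : (PySem.List.pyRange (max 0 (i - w)) (min ((ws.length) : Int) (i + w + 1)) 1).filter
            (fun j => decide (pvMask (ws.map (fun x => hterms.contains x)) j = false))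
          = (PySem.List.pyRange (max 0 (i - w)) i 1).filter
              (fun j => decide (pvMask (ws.map (fun x => hterms.contains x)) j = false))
            ++ (PySem.List.pyRange (i + 1) (min ((ws.length) : Int) (i + w + 1)) 1).filter
              (fun j => decide (pvMask (ws.map (fun x => hterms.contains x)) j = false)) := by
        rw [PySem.List.pyRange_one_append (max 0 (i - w)) i (min ((ws.length) : Int) (i + w + 1))
              (by omega) (by omega),
            PySem.List.pyRange_one_cons (by omega : i < min ((ws.length) : Int) (i + w + 1))]
        rw [List.filter_append, List.filter_cons, hmi]
        simp only [Bool.false_eq_true, if_false]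
      rw [hsplit2, List.filter_append, List.foldl_append, List.foldl_append]
      rfl
    · rw [if_neg hg, if_neg (by exact fun hc => hg hc)])]
  rw [PySem.List.foldl_if_eq_foldl_filter (fun i => pvMask (ws.map (fun x => hterms.contains x)) i)
      (pvUpd ws (ws.map (fun x => hterms.contains x)) w)]
  rw [pvTA ws (ws.map (fun x => hterms.contains x)) w hw _
      (List.Pairwise.filter _ (PySem.List.pairwise_lt_pyRange_one 0 (ws.length : Int)))
      (by
        intro i hi
        have := (List.mem_filter.mp hi).1
        rw [PySem.List.mem_pyRange_one] at this
        exact this) c]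
  unfold pvSegG
  apply PySem.List.foldl_congr_mem
  intro acc j hj
  rw [PySem.List.mem_pyRange_one] at hj
  unfold pvStepG pvStepC pvKey
  have hfull := pvCg_full (ws.map (fun x => hterms.contains x)) w j hw hj.1 (by
    rw [hlen]; exact hj.2)
  rw [hlen] at hfull
  rw [hfull]
  unfold pvMask
  rfl

theorem pvStepB_zero (ws : List String) (msk : List Bool) (w : Int)
    (c : PySem.Dict String Int) (s0 : Int) :
    pvStepB ws msk w (s0, c) 0
      = (s0, if PySem.List.pyGetD msk 0 false = false ∧ s0 ≠ 0 then
          pvAdd c (PySem.List.pyGetD ws 0 "") s0 else c) := by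
  unfold pvStepB
  rw [if_neg (by omega : ¬ (0:Int) < 0)]
  rfl

theorem pvPerTextB (ws : List String) (msk : List Bool) (w : Int) (hw : 0 ≤ w)
    (hlen : msk.length = ws.length) (c : PySem.Dict String Int) :
    ((PySem.List.pyRange 0 (ws.length : Int) 1).foldl (pvStepB ws msk w) (pvC msk w 0, c)).2
      = (PySem.List.pyRange 0 (ws.length : Int) 1).foldl (pvStepC ws msk w) c := by
  by_cases hn : (ws.length : Int) = 0
  · rw [hn, PySem.List.pyRange_one_eq_nil (by omega)]
    rfl
  · rw [PySem.List.pyRange_one_cons (by omega : (0:Int) < (ws.length : Int))]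
    rw [List.foldl_cons, List.foldl_cons, pvStepB_zero]
    have hstep0 : (if PySem.List.pyGetD msk 0 false = false ∧ pvC msk w 0 ≠ 0 then
        pvAdd c (PySem.List.pyGetD ws 0 "") (pvC msk w 0) else c) = pvStepC ws msk w c 0 := rfl
    rw [hstep0]
    have h10 : (1 : Int) - 1 = 0 := by omega
    have := pvTB_aux ws msk w hw hlen (ws.length - 1) 1 (by omega) (by
      have : 0 < ws.length := by omega
      push_cast
      omega)
      (pvStepC ws msk w c 0)
    rw [h10] at this
    exact this

theorem pvCnt0' (ws : List String) (hterms : List String) (w : Int) (hw : 0 ≤ w) :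
    ((PySem.List.slice (ws.map fun x => hterms.contains x) (some 0)
        (some (min (PySem.List.len ws) (w + 1)))).map (fun b => if b then (1 : Int) else 0)).sum
      = pvC (ws.map fun x => hterms.contains x) w 0 := by
  have h := pvCnt0 (ws.map fun x => hterms.contains x) w hw
  have he : (min (((ws.map fun x => hterms.contains x).length : Nat) : Int) (w + 1))
      = min (PySem.List.len ws) (w + 1) := by
    simp [PySem.List.len_eq]
  rw [he] at h
  exact h

def pvStepOutA (ht : PySem.Dict Int (List String)) (w : Int)
    (ck : PySem.Dict Int (PySem.Dict String Int)) (p : List String × Int) :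
    PySem.Dict Int (PySem.Dict String Int) :=
  (PySem.List.enumerate p.1).foldl (fun ck iw =>
    if (ht.getD p.2 []).contains iw.2 = true then
      ck.insert p.2 (((PySem.List.slice p.1 (some (max 0 (iw.1 - w))) (some iw.1) ++
        PySem.List.slice p.1 (some (iw.1 + 1)) (some (min (PySem.List.len p.1) (iw.1 + w + 1)))).filter
          (fun x => !((ht.getD p.2 []).contains x))).foldl (fun c x => c.modify x 0 (· + 1))
            (ck.getD p.2 PySem.Dict.empty))
    else ck) ck

def pvStepOutB (ht : PySem.Dict Int (List String)) (w : Int)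
    (ck : PySem.Dict Int (PySem.Dict String Int)) (p : List String × Int) :
    PySem.Dict Int (PySem.Dict String Int) :=
  ck.insert p.2 (((PySem.List.pyRange 0 (PySem.List.len p.1) 1).foldl
      (pvStepB p.1 (p.1.map (fun x => PySem.Set.contains (PySem.Set.ofList (ht.getD p.2 [])) x)) w)
      (((PySem.List.slice (p.1.map (fun x => PySem.Set.contains (PySem.Set.ofList (ht.getD p.2 [])) x))
          (some 0) (some (min (PySem.List.len p.1) (w + 1)))).map
            (fun b => if b then (1 : Int) else 0)).sum,
        ck.getD p.2 PySem.Dict.empty)).2)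

theorem pvOuter (zl : List (List String × Int)) (ht : PySem.Dict Int (List String)) (w : Int)
    (hw : 0 ≤ w) :
    ∀ ck : PySem.Dict Int (PySem.Dict String Int),
      (∀ p ∈ zl, ck.contains p.2 = true) → ck.keys.Nodup →
      zl.foldl (pvStepOutA ht w) ck = zl.foldl (pvStepOutB ht w) ck := by
  induction zl with
  | nil => intro ck _ _; rfl
  | cons p tl ih =>
    intro ck hcont hnd
    rw [List.foldl_cons, List.foldl_cons]
    have hc : ck.contains p.2 = true := hcont p (List.mem_cons_self ..)
    have hmsk : p.1.map (fun x => PySem.Set.contains (PySem.Set.ofList (ht.getD p.2 [])) x)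
        = p.1.map (fun x => (ht.getD p.2 []).contains x) := by
      apply List.map_congr_left
      intro a _
      exact pvSetContains _ _
    have hA : pvStepOutA ht w ck p
        = ck.insert p.2 ((PySem.List.pyRange 0 (p.1.length : Int) 1).foldl
            (pvStepC p.1 (p.1.map (fun x => (ht.getD p.2 []).contains x)) w)
            (ck.getD p.2 PySem.Dict.empty)) := by
      have h1 := pvInsFold (PySem.List.enumerate p.1) p.2
        (fun iw => (ht.getD p.2 []).contains iw.2 = true)
        (fun c iw => ((PySem.List.slice p.1 (some (max 0 (iw.1 - w))) (some iw.1) ++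
          PySem.List.slice p.1 (some (iw.1 + 1)) (some (min (PySem.List.len p.1) (iw.1 + w + 1)))).filter
            (fun x => !((ht.getD p.2 []).contains x))).foldl (fun c x => c.modify x 0 (· + 1)) c)
        ck hc hnd
      calc pvStepOutA ht w ck p
          = ck.insert p.2 ((PySem.List.enumerate p.1).foldl (fun c iw =>
              if (ht.getD p.2 []).contains iw.2 = true then
                ((PySem.List.slice p.1 (some (max 0 (iw.1 - w))) (some iw.1) ++
                  PySem.List.slice p.1 (some (iw.1 + 1)) (some (min (PySem.List.len p.1) (iw.1 + w + 1)))).filter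
                    (fun x => !((ht.getD p.2 []).contains x))).foldl (fun c x => c.modify x 0 (· + 1)) c
              else c) (ck.getD p.2 PySem.Dict.empty)) := h1
        _ = _ := congrArg (ck.insert p.2)
              (pvPerTextA p.1 (ht.getD p.2 []) w hw (ck.getD p.2 PySem.Dict.empty))
    have hB : pvStepOutB ht w ck p
        = ck.insert p.2 ((PySem.List.pyRange 0 (p.1.length : Int) 1).foldl
            (pvStepC p.1 (p.1.map (fun x => (ht.getD p.2 []).contains x)) w)
            (ck.getD p.2 PySem.Dict.empty)) := by
      unfold pvStepOutB
      rw [hmsk]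
      refine congrArg (ck.insert p.2) ?_
      rw [pvCnt0' p.1 (ht.getD p.2 []) w hw]
      exact pvPerTextB p.1 (p.1.map (fun x => (ht.getD p.2 []).contains x)) w hw (by simp)
        (ck.getD p.2 PySem.Dict.empty)
    rw [hA, hB]
    apply ih
    · intro q hq
      rw [PySem.Dict.contains_insert]
      rw [hcont q (List.mem_cons_of_mem _ hq)]
      simp
    · exact PySem.Dict.nodup_keys_insert _ _ _ hnd

theorem pv_spec_main : ∀ (texts : List (List String)) (hate_terms : List (Int × List String))
    (assigned_topics : List Int) (window : Int),
    0 ≤ window →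
    get_contextual_keywords texts hate_terms assigned_topics window
      = get_contextual_keywords_alt texts hate_terms assigned_topics window := by
  intro texts hate_terms assigned_topics window hw
  have hnd0 : ((PySem.Set.ofList assigned_topics).foldl
      (fun d topic => d.insert topic PySem.Dict.empty)
      (⟨[]⟩ : PySem.Dict Int (PySem.Dict String Int))).keys.Nodup := by
    apply PySem.Dict.nodup_keys_foldl_insert
    exact List.nodup_nil
  have hcont0 : ∀ p ∈ texts.zip assigned_topics,
      ((PySem.Set.ofList assigned_topics).foldl
        (fun d topic => d.insert topic PySem.Dict.empty)
        (⟨[]⟩ : PySem.Dict Int (PySem.Dict String Int))).contains p.2 = true := by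
    intro p hp
    obtain ⟨a, b⟩ := p
    have hmem : b ∈ assigned_topics := (List.of_mem_zip hp).2
    rw [PySem.Dict.contains_iff_mem_keys, PySem.Dict.keys_foldl_insert]
    have hk : (⟨[]⟩ : PySem.Dict Int (PySem.Dict String Int)).keys = [] := rfl
    rw [hk, PySem.Set.update_nil_left, PySem.Set.ofList_ofList]
    exact (PySem.Set.mem_ofList _ _).mpr hmem
  exact congrArg (fun d : PySem.Dict Int (PySem.Dict String Int) =>
      d.items.map (fun q => (q.1, q.2.items)))
    (pvOuter (texts.zip assigned_topics) ⟨hate_terms⟩ window hw _ hcont0 hnd0)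

-- ===== VERDICT (by name: the statement is the Claim_ definition above) =====
theorem get_contextual_keywords_spec : Claim_equal_get_contextual_keywords := by
  intro texts hate_terms assigned_topics window _ hpre
  exact pv_spec_main texts hate_terms assigned_topics window hpre.1
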